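-- pv_equiv track=rewrite | github.com/kiung22/algorithm-problem-solving | Programmers/level3/110_옮기기.py | solution
-- ===== SOURCE A (Python) =====
-- def solution(s):
--     answer = []
--     for x in s:
--         count_1 = 0
--         count_110 = 0
--         result = ""
--         for num in x:
--             if num == "1":
--                 count_1 += 1
--             else:
--                 if count_1 >= 2:
--                     count_1 -= 2
--                     count_110 += 1
--                 else:
--                     result += "1" * count_1 + "0"
--                     count_1 = 0
--         result += "110" * count_110 + "1" * count_1
--         answer.append(result)
--     return answer
-- ===== SOURCE B (Python) =====
-- def solution(s):
--     answer = []
--     for x in s: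
--         # stack pass: push chars ('0' for any non-'1'), remove "110" blocks as they form
--         stack = []
--         cnt = 0
--         for ch in x:
--             stack.append(ch if ch == "1" else "0")
--             if stack[-3:] == ["1", "1", "0"]:
--                 del stack[-3:]
--                 cnt += 1
--         # reinsert the removed blocks right after the last '0' (i.e. before trailing 1s)
--         tail = 0
--         while stack and stack[-1] == "1":
--             stack.pop()
--             tail += 1
--         answer.append("".join(stack) + "110" * cnt + "1" * tail)
--     return answer
-- ===== Notes on version B (the rewrite author's own statement) =====
-- stated objective: alternative
-- what changed: Replaces A's count_1/count_110 counter bookkeeping with an explicit stack pass that deletes '110' triples as they form, then splices the removed blocks back in after the last '0' (before the trailing run of 1s).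
import Mathlib
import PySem

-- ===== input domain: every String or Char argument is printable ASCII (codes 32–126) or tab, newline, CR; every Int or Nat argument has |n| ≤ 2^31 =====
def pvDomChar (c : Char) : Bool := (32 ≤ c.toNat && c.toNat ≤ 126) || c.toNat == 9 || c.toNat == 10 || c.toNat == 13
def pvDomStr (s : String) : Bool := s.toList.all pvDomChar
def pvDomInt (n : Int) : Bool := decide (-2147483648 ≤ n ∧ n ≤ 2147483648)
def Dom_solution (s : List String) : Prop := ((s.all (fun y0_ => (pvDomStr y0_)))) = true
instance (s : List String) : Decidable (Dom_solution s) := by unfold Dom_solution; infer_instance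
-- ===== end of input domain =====

-- B replaces A's counter bookkeeping by a one-pass stack that removes "110" blocks as
-- they form, then splices the removed blocks back before the trailing run of 1s
-- (objective: alternative decomposition, same cost).

-- ===== PORT A =====
-- inner character loop of A: state (count_1, count_110, result)
def aLoop : List Char → Nat → Nat → List Char → Nat × Nat × List Char
  | [], c1, c110, res => (c1, c110, res)
  | num :: rest, c1, c110, res =>
    if num = '1' then aLoop rest (c1 + 1) c110 res
    else if c1 ≥ 2 then aLoop rest (c1 - 2) (c110 + 1) res
    else aLoop rest 0 c110 (res ++ List.replicate c1 '1' ++ ['0'])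

def solution (s : List String) : List String :=
  s.map (fun x =>
    let r := aLoop x.toList 0 0 []
    String.mk (r.2.2 ++ (List.replicate r.2.1 ['1', '1', '0']).flatten ++ List.replicate r.1 '1'))

-- ===== PORT B =====
-- inner loop of B: the stack is kept top-first (Python appends at the end, so
-- Python's stack[-3:] == list("110") is take 3 = "011" here); state (stack, cnt)
def bLoop : List Char → List Char → Nat → List Char × Nat
  | [], st, n => (st, n)
  | ch :: rest, st, n =>
    let st1 := (if ch = '1' then '1' else '0') :: st
    if st1.take 3 = ['0', '1', '1'] then bLoop rest (st1.drop 3) (n + 1)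
    else bLoop rest st1 n

def solution_alt (s : List String) : List String :=
  s.map (fun x =>
    let r := bLoop x.toList [] 0
    -- pop the trailing run of 1s (the stack's top), splice the blocks in between
    let tail := (r.1.takeWhile (· = '1')).length
    let body := r.1.dropWhile (· = '1')
    String.mk (body.reverse ++ (List.replicate r.2 ['1', '1', '0']).flatten ++ List.replicate tail '1'))

-- ===== PRECONDITION & SPEC =====
def Spec_solution (s : List String) (out : List String) : Prop := out = solution_alt s
instance (s : List String) (out : List String) : Decidable (Spec_solution s out) := by unfold Spec_solution; infer_instance

-- ===== CLAIM (what is proved, stated in full; the proofs are below) =====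
def Claim_equal_solution : Prop := ∀ (s : List String), Dom_solution s → Spec_solution s (solution s)

-- ===== LEMMAS AND PROOFS =====

-- invariant on A's result accumulator: empty or ending in '0'
def InvRes (res : List Char) : Prop := res.reverse = [] ∨ ∃ t, res.reverse = '0' :: t

lemma inv_append (res : List Char) (c1 : Nat) (h : c1 ≤ 1) :
    InvRes (res ++ List.replicate c1 '1' ++ ['0']) := by
  right
  interval_cases c1 <;> simp

lemma loop_sim : ∀ (chars : List Char) (c1 c110 : Nat) (res : List Char), InvRes res →
    InvRes (aLoop chars c1 c110 res).2.2 ∧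
    bLoop chars (List.replicate c1 '1' ++ res.reverse) c110 =
      (List.replicate (aLoop chars c1 c110 res).1 '1' ++ (aLoop chars c1 c110 res).2.2.reverse,
       (aLoop chars c1 c110 res).2.1) := by
  intro chars
  induction chars with
  | nil => intro c1 c110 res h; exact ⟨h, rfl⟩
  | cons ch rest ih =>
    intro c1 c110 res h
    by_cases h1 : ch = '1'
    · -- push a '1'
      have hpush : ('1' :: (List.replicate c1 '1' ++ res.reverse)).take 3 ≠ ['0', '1', '1'] := by
        simp [List.take_succ_cons]
      subst h1
      have := ih (c1 + 1) c110 res h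
      rw [List.replicate_succ] at this
      rw [aLoop, bLoop]
      simpa [hpush] using this
    · by_cases h2 : c1 ≥ 2
      · -- pop a "110" block
        obtain ⟨k, rfl⟩ : ∃ k, c1 = k + 2 := ⟨c1 - 2, by omega⟩
        have hrepl : List.replicate (k + 2) '1' = '1' :: '1' :: List.replicate k '1' := by
          simp [List.replicate_succ]
        rw [aLoop, bLoop, hrepl]
        simpa [h1, h2] using ih k (c110 + 1) res h
      · -- emit "1"*c1 + "0"
        have hc1 : c1 ≤ 1 := by omega
        have hst : (('0' :: (List.replicate c1 '1' ++ res.reverse)).take 3 ≠ ['0', '1', '1']) := by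
          rcases h with h | ⟨t, h⟩ <;> rw [h] <;> interval_cases c1 <;>
            simp [List.take_succ_cons]
        rw [aLoop, bLoop]
        simp only [if_neg h1, if_neg h2, if_neg hst]
        have hrev : '0' :: (List.replicate c1 '1' ++ res.reverse) =
            List.replicate 0 '1' ++ (res ++ List.replicate c1 '1' ++ ['0']).reverse := by
          interval_cases c1 <;> simp
        rw [hrev]
        exact ih 0 c110 (res ++ List.replicate c1 '1' ++ ['0']) (inv_append res c1 hc1)

lemma split_stack (c1 : Nat) (l : List Char) (h : l = [] ∨ ∃ t, l = '0' :: t) :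
    (List.replicate c1 '1' ++ l).takeWhile (· = '1') = List.replicate c1 '1' ∧
    (List.replicate c1 '1' ++ l).dropWhile (· = '1') = l := by
  induction c1 with
  | zero =>
    rcases h with rfl | ⟨t, rfl⟩ <;> simp
  | succ k ih =>
    rw [List.replicate_succ]
    simp only [List.cons_append, List.takeWhile, List.dropWhile]
    simpa using ih

lemma per_string (x : List Char) :
    (let r := aLoop x 0 0 []
     r.2.2 ++ (List.replicate r.2.1 ['1', '1', '0']).flatten ++ List.replicate r.1 '1') =
    (let r := bLoop x [] 0
     let tail := (r.1.takeWhile (· = '1')).length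
     let body := r.1.dropWhile (· = '1')
     body.reverse ++ (List.replicate r.2 ['1', '1', '0']).flatten ++ List.replicate tail '1') := by
  have h0 : InvRes ([] : List Char) := Or.inl rfl
  obtain ⟨hinv, hsim⟩ := loop_sim x 0 0 [] h0
  have hstart : bLoop x [] 0 = bLoop x (List.replicate 0 '1' ++ ([] : List Char).reverse) 0 := by simp
  rw [hstart, hsim]
  obtain ⟨htake, hdrop⟩ := split_stack (aLoop x 0 0 []).1 (aLoop x 0 0 []).2.2.reverse
    (by rcases hinv with h | ⟨t, h⟩; exacts [Or.inl h, Or.inr ⟨t, h⟩])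
  simp only [htake, hdrop, List.length_replicate, List.reverse_reverse]

-- ===== VERDICT (by name: the statement is the Claim_ definition above) =====
theorem solution_spec : Claim_equal_solution := by
  intro s _
  unfold Spec_solution solution solution_alt
  apply List.map_congr_left
  intro x _
  exact congrArg String.mk (per_string x.toList)
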